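-- pv_equiv track=rewrite | github.com/pjy0422/verl-agent | agent_system/multi_turn_rollout/test_loss_mask_fix.py | parse_role_segments
-- ===== SOURCE A (Python) =====
-- def parse_role_segments(text):
--     """Parse text into (role, content) segments based on role markers."""
--     lines = text.split("\n")
--     segments = []
--     current_role = None
--     current_lines = []
--
--     for line in lines:
--         stripped = line.strip().lower()
--         if stripped in ("system", "user", "assistant"):
--             if current_role is not None:
--                 segments.append((current_role, "\n".join(current_lines)))
--             current_role = stripped
--             current_lines = []
--         else:
--             current_lines.append(line)
--
--     if current_role:
--         segments.append((current_role, "\n".join(current_lines)))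
--
--     return segments
-- ===== SOURCE B (Python) =====
-- def parse_role_segments(text):
--     """Parse text into (role, content) segments based on role markers."""
--     lines = text.split("\n")
--     marks = []
--     for i, line in enumerate(lines):
--         s = line.strip().lower()
--         if s in ("system", "user", "assistant"):
--             marks.append((i, s))
--     bounds = [i for i, _ in marks[1:]] + [len(lines)]
--     return [(role, "\n".join(lines[i + 1:j]))
--             for (i, role), j in zip(marks, bounds)]
-- ===== Notes on version B (the rewrite author's own statement) =====
-- stated objective: alternative
-- what changed: Replaces A's single accumulator loop (current_role/current_lines threaded through every line plus a trailing flush) with an index-table-then-slice design: one pass records (index, role) for each marker line, then each segment is produced by slicing the lines between consecutive marker indices; pre-first-marker lines are dropped because they precede every recorded index.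
import Mathlib
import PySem

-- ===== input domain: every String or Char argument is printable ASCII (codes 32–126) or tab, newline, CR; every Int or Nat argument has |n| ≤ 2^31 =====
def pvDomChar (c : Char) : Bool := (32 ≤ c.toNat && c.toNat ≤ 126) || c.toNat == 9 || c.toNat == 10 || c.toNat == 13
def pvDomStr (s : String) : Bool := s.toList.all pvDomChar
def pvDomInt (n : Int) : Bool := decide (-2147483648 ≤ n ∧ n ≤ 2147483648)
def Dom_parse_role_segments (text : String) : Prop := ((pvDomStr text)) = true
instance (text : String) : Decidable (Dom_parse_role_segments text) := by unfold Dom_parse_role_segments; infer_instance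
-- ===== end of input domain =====

-- B replaces A's accumulator loop by an index-table-then-slice decomposition (same cost; objective: alternative).


-- ===== PORT A =====
-- A's loop body: state = (segments, current_role, current_lines)
def pvAStep (st : List (String × String) × Option String × List String) (line : String) :
    List (String × String) × Option String × List String :=
  let stripped := PySem.Str.lower (PySem.Str.strip line)
  if stripped == "system" || stripped == "user" || stripped == "assistant" then
    match st with
    | (segments, some r, current_lines) =>
        (segments ++ [(r, PySem.Str.join "\n" current_lines)], some stripped, [])
    | (segments, none, _) => (segments, some stripped, [])
  else (st.1, st.2.1, st.2.2 ++ [line])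

-- A's trailing flush ('if current_role:'; the role is never the empty string)
def pvAFinish (st : List (String × String) × Option String × List String) : List (String × String) :=
  match st with
  | (segments, some r, current_lines) => segments ++ [(r, PySem.Str.join "\n" current_lines)]
  | (segments, none, _) => segments

def parse_role_segments (text : String) : List (String × String) :=
  pvAFinish (((PySem.Str.split? text "\n").getD []).foldl pvAStep ([], none, []))

-- ===== PORT B =====
-- first pass: record (index, role) for every marker line
def pvBStep (acc : List (Int × String)) (p : Int × String) : List (Int × String) :=
  let s := PySem.Str.lower (PySem.Str.strip p.2)
  if s == "system" || s == "user" || s == "assistant" then acc ++ [(p.1, s)] else acc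

def parse_role_segments_alt (text : String) : List (String × String) :=
  let lines := (PySem.Str.split? text "\n").getD []
  let marks := (PySem.List.enumerate lines).foldl pvBStep []
  let bounds := (marks.drop 1).map (·.1) ++ [PySem.List.len lines]
  (marks.zip bounds).map (fun q =>
    (q.1.2, PySem.Str.join "\n" (PySem.List.slice lines (some (q.1.1 + 1)) (some q.2))))

-- ===== PRECONDITION & SPEC =====
def Spec_parse_role_segments (text : String) (out : List (String × String)) : Prop := out = parse_role_segments_alt text
instance (text : String) (out : List (String × String)) : Decidable (Spec_parse_role_segments text out) := by unfold Spec_parse_role_segments; infer_instance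

-- ===== CLAIM (what is proved, stated in full; the proofs are below) =====
def Claim_equal_parse_role_segments : Prop := ∀ (text : String), Dom_parse_role_segments text → Spec_parse_role_segments text (parse_role_segments text)

-- ===== LEMMAS AND PROOFS =====

-- the marker test and the role a marker line carries
def pvIsM (l : String) : Bool :=
  let s := PySem.Str.lower (PySem.Str.strip l)
  s == "system" || s == "user" || s == "assistant"

def pvRole (l : String) : String := PySem.Str.lower (PySem.Str.strip l)

def pvJoin (ls : List String) : String := PySem.Str.join "\n" ls

-- reference recursion both ports are reduced to
def pvSome (r : String) (cur : List String) : List String → List (String × String)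
  | [] => [(r, pvJoin cur)]
  | l :: t => if pvIsM l then (r, pvJoin cur) :: pvSome (pvRole l) [] t else pvSome r (cur ++ [l]) t

def pvNoneSeg : List String → List (String × String)
  | [] => []
  | l :: t => if pvIsM l then pvSome (pvRole l) [] t else pvNoneSeg t

-- Nat-indexed marker table
def pvMarksN : List String → Nat → List (Nat × String)
  | [], _ => []
  | l :: t, s => (if pvIsM l then [(s, pvRole l)] else []) ++ pvMarksN t (s + 1)

-- index of the first marker line (length if none)
def pvFirst (t : List String) : Nat :=
  match pvMarksN t 0 with
  | [] => t.length
  | p :: _ => p.1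

-- Nat-level rendering of B's second pass
def pvEntry (lines : List String) (q : (Nat × String) × Nat) : String × String :=
  (q.1.2, pvJoin ((lines.drop (q.1.1 + 1)).take (q.2 - (q.1.1 + 1))))

def pvSegN (lines : List String) : List (String × String) :=
  let M := pvMarksN lines 0
  ((M.zip ((M.drop 1).map (·.1) ++ [lines.length]))).map (pvEntry lines)

-- ---- A side ----

lemma pvAStep_true {line : String} (h : pvIsM line = true)
    (segs : List (String × String)) (ro : Option String) (cur : List String) :
    pvAStep (segs, ro, cur) line =
      (match ro with
       | some r => (segs ++ [(r, pvJoin cur)], some (pvRole line), [])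
       | none => (segs, some (pvRole line), [])) := by
  have h' : (PySem.Str.lower (PySem.Str.strip line) == "system"
      || PySem.Str.lower (PySem.Str.strip line) == "user"
      || PySem.Str.lower (PySem.Str.strip line) == "assistant") = true := by
    simpa [pvIsM] using h
  cases ro <;> simp [pvAStep, pvRole, pvJoin, h']

lemma pvAStep_false {line : String} (h : pvIsM line = false)
    (segs : List (String × String)) (ro : Option String) (cur : List String) :
    pvAStep (segs, ro, cur) line = (segs, ro, cur ++ [line]) := by
  have h' : (PySem.Str.lower (PySem.Str.strip line) == "system"
      || PySem.Str.lower (PySem.Str.strip line) == "user"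
      || PySem.Str.lower (PySem.Str.strip line) == "assistant") = false := by
    simpa [pvIsM] using h
  cases ro <;> simp [pvAStep, h']

lemma pvA_some (ls : List String) : ∀ (segs : List (String × String)) (r : String) (cur : List String),
    pvAFinish (ls.foldl pvAStep (segs, some r, cur)) = segs ++ pvSome r cur ls := by
  induction ls with
  | nil => intro segs r cur; simp [pvAFinish, pvSome, pvJoin]
  | cons l t ih =>
    intro segs r cur
    by_cases h : pvIsM l = true
    · simp only [List.foldl_cons, pvAStep_true h, pvSome, h, if_pos]
      rw [ih]; simp
    · simp only [Bool.not_eq_true] at h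
      simp only [List.foldl_cons, pvAStep_false h, pvSome, h]
      rw [ih]; simp

lemma pvA_none (ls : List String) : ∀ (segs : List (String × String)) (cur : List String),
    pvAFinish (ls.foldl pvAStep (segs, none, cur)) = segs ++ pvNoneSeg ls := by
  induction ls with
  | nil => intro segs cur; simp [pvAFinish, pvNoneSeg]
  | cons l t ih =>
    intro segs cur
    by_cases h : pvIsM l = true
    · simp only [List.foldl_cons, pvAStep_true h, pvNoneSeg, h, if_pos]
      exact pvA_some t segs (pvRole l) []
    · simp only [Bool.not_eq_true] at h
      simp only [List.foldl_cons, pvAStep_false h, pvNoneSeg, h]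
      exact ih segs (cur ++ [l])

-- ---- B side ----

lemma pvBStep_eq (acc : List (Int × String)) (p : Int × String) :
    pvBStep acc p = if pvIsM p.2 then acc ++ [(p.1, pvRole p.2)] else acc := by
  simp [pvBStep, pvIsM, pvRole]

lemma pvB_marks (ls : List String) : ∀ (s : Nat) (acc : List (Int × String)),
    (PySem.List.enumerate ls (s : Int)).foldl pvBStep acc
      = acc ++ (pvMarksN ls s).map (fun p => ((p.1 : Int), p.2)) := by
  induction ls with
  | nil => intro s acc; simp [PySem.List.enumerate_nil, pvMarksN]
  | cons l t ih =>
    intro s acc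
    rw [PySem.List.enumerate_cons]
    simp only [List.foldl_cons, pvBStep_eq]
    have hc : ((s : Int) + 1) = ((s + 1 : Nat) : Int) := by push_cast; ring
    by_cases h : pvIsM l = true
    · simp only [h, if_pos, pvMarksN]
      rw [hc, ih]
      simp
    · simp only [Bool.not_eq_true] at h
      simp only [h, pvMarksN]
      rw [hc, ih]
      simp

lemma pvMarksN_shift (ls : List String) : ∀ (s : Nat),
    pvMarksN ls (s + 1) = (pvMarksN ls s).map (fun p => (p.1 + 1, p.2)) := by
  induction ls with
  | nil => intro s; simp [pvMarksN]
  | cons l t ih =>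
    intro s
    simp only [pvMarksN, List.map_append, ih (s + 1), ih s]
    by_cases h : pvIsM l = true <;> simp [h, List.map_map]

lemma pvFirst_cons_true {l : String} (h : pvIsM l = true) (t : List String) :
    pvFirst (l :: t) = 0 := by
  simp [pvFirst, pvMarksN, h]

lemma pvFirst_cons_false {l : String} (h : pvIsM l = false) (t : List String) :
    pvFirst (l :: t) = pvFirst t + 1 := by
  simp only [pvFirst, pvMarksN, h, Bool.false_eq_true, if_neg, not_false_eq_true,
    List.nil_append, pvMarksN_shift t 0]
  cases pvMarksN t 0 <;> simp

lemma pvSome_eq (t : List String) : ∀ (r : String) (cur : List String),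
    pvSome r cur t = (r, pvJoin (cur ++ t.take (pvFirst t))) :: pvNoneSeg t := by
  induction t with
  | nil => intro r cur; simp [pvSome, pvFirst, pvMarksN, pvNoneSeg]
  | cons x t ih =>
    intro r cur
    by_cases h : pvIsM x = true
    · simp [pvSome, pvNoneSeg, h, pvFirst_cons_true h]
    · simp only [Bool.not_eq_true] at h
      simp only [pvSome, h, Bool.false_eq_true, if_neg, not_false_eq_true, ih,
        pvFirst_cons_false h, pvNoneSeg]
      simp [List.take_succ_cons]

-- the shifted zip collapses onto the tail list
lemma pvSeg_shift (l : String) (t : List String) (M : List (Nat × String)) (B : List Nat) :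
    ((M.map (fun p => (p.1 + 1, p.2))).zip (B.map (· + 1))).map (pvEntry (l :: t))
      = (M.zip B).map (pvEntry t) := by
  rw [List.zip_map]
  rw [List.map_map]
  congr 1
  funext q
  simp only [Function.comp, Prod.map, pvEntry, List.drop_succ_cons]
  have harith : q.2 + 1 - (q.1.1 + 1 + 1) = q.2 - (q.1.1 + 1) := by omega
  rw [harith]

lemma pvSegN_cons_false {l : String} (h : pvIsM l = false) (t : List String) :
    pvSegN (l :: t) = pvSegN t := by
  simp only [pvSegN, pvMarksN, h, Bool.false_eq_true, if_neg, not_false_eq_true,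
    List.nil_append, pvMarksN_shift t 0]
  have hb : ((((pvMarksN t 0).map (fun p => (p.1 + 1, p.2))).drop 1).map (·.1)
      ++ [(l :: t).length])
      = (((pvMarksN t 0).drop 1).map (·.1) ++ [t.length]).map (· + 1) := by
    simp only [List.map_drop, List.map_map, List.map_append, List.map_cons, List.map_nil,
      List.length_cons]
    rfl
  rw [hb, pvSeg_shift]

lemma pvSegN_cons_true {l : String} (h : pvIsM l = true) (t : List String) :
    pvSegN (l :: t) = (pvRole l, pvJoin (t.take (pvFirst t))) :: pvSegN t := by
  simp only [pvSegN, pvMarksN, h, if_pos, List.singleton_append, pvMarksN_shift t 0,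
    List.length_cons]
  cases hM : pvMarksN t 0 with
  | nil =>
    simp [pvFirst, hM, pvEntry, List.take_length]
  | cons p rest =>
    simp only [List.map_cons, List.drop_succ_cons, List.drop_zero, List.cons_append,
      List.zip_cons_cons, List.map_cons]
    refine List.cons_eq_cons.mpr ⟨?_, ?_⟩
    · simp [pvEntry, pvFirst, hM]
    · have hb : ((rest.map (fun p => (p.1 + 1, p.2))).map (·.1) ++ [t.length + 1])
          = ((rest.map (·.1)) ++ [t.length]).map (· + 1) := by
        simp only [List.map_map, List.map_append, List.map_cons, List.map_nil]
        rfl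
      rw [hb]
      have hs := pvSeg_shift l t (p :: rest) ((rest.map (·.1)) ++ [t.length])
      simp only [List.map_cons] at hs
      rw [hs]

lemma pvSegN_eq_pvNoneSeg (ls : List String) : pvSegN ls = pvNoneSeg ls := by
  induction ls with
  | nil => rfl
  | cons l t ih =>
    by_cases h : pvIsM l = true
    · rw [pvSegN_cons_true h, ih, pvNoneSeg]
      simp only [h, if_pos]
      rw [pvSome_eq t (pvRole l) []]
      simp
    · simp only [Bool.not_eq_true] at h
      rw [pvSegN_cons_false h, ih, pvNoneSeg]
      simp [h]

-- B's port computes pvSegN of the line list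
lemma pvB_eq_pvSegN (ls : List String) :
    (((PySem.List.enumerate ls).foldl pvBStep []).zip
        ((((PySem.List.enumerate ls).foldl pvBStep []).drop 1).map (·.1) ++ [PySem.List.len ls])).map
      (fun q => (q.1.2, PySem.Str.join "\n" (PySem.List.slice ls (some (q.1.1 + 1)) (some q.2))))
      = pvSegN ls := by
  have h0 : (PySem.List.enumerate ls).foldl pvBStep []
      = (pvMarksN ls 0).map (fun p => ((p.1 : Int), p.2)) := by
    have := pvB_marks ls 0 []
    simpa using this
  rw [h0]
  have hb : ((((pvMarksN ls 0).map (fun p => ((p.1 : Int), p.2))).drop 1).map (·.1)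
      ++ [PySem.List.len ls])
      = (((pvMarksN ls 0).drop 1).map (·.1) ++ [ls.length]).map (fun (n : Nat) => (n : Int)) := by
    simp only [List.map_drop, List.map_map, List.map_append, List.map_cons, List.map_nil,
      PySem.List.len_eq]
    rfl
  rw [hb, List.zip_map, List.map_map]
  unfold pvSegN
  congr 1
  funext q
  simp only [Function.comp, Prod.map, pvEntry, pvJoin]
  congr 1
  have hc : ((q.1.1 : Int) + 1) = ((q.1.1 + 1 : Nat) : Int) := by push_cast; ring
  rw [hc, PySem.List.slice_natCast]

-- ===== VERDICT (by name: the statement is the Claim_ definition above) =====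
theorem parse_role_segments_spec : Claim_equal_parse_role_segments := by
  intro text _
  unfold Spec_parse_role_segments parse_role_segments parse_role_segments_alt
  rw [pvB_eq_pvSegN, pvSegN_eq_pvNoneSeg]
  simpa using pvA_none ((PySem.Str.split? text "\n").getD []) [] []
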